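-- pv_equiv track=rewrite | github.com/dollyishere/baek- | 프로그래머스/1/138477. 명예의 전당 （1）/명예의 전당 （1）.py | solution
-- ===== SOURCE A (Python) =====
-- def solution(k, score):
--     answer = []
--     legend = []
--     for today_s in score:
--         if len(legend) < k:
--             legend.append(today_s)
--         else:
--             if legend[-1] < today_s:
--                 legend.pop()
--                 legend.append(today_s)
--         legend.sort(reverse=True)
--         answer.append(legend[-1])
--
--     return answer
-- ===== SOURCE B (Python) =====
-- def solution(k, score):
--     # Maintain the hall of fame as an ascending list of (at most k) best scores:
--     # binary-search each day's score to its sorted position, insert it, drop the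
--     # minimum when over capacity, and read the day's answer as the first element.
--     answer = []
--     hall = []  # ascending
--     for s in score:
--         lo, hi = 0, len(hall)
--         while lo < hi:
--             mid = (lo + hi) // 2
--             if hall[mid] <= s:
--                 lo = mid + 1
--             else:
--                 hi = mid
--         hall.insert(lo, s)
--         if len(hall) > k:
--             hall.pop(0)
--         answer.append(hall[0])
--     return answer
-- ===== Notes on version B (the rewrite author's own statement) =====
-- stated objective: faster
-- what changed: B keeps the hall as an ascending list updated by a binary-searched positional insertion plus a single pop of the minimum, instead of A's append/replace-last followed by a full descending re-sort every day.
import Mathlib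
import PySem

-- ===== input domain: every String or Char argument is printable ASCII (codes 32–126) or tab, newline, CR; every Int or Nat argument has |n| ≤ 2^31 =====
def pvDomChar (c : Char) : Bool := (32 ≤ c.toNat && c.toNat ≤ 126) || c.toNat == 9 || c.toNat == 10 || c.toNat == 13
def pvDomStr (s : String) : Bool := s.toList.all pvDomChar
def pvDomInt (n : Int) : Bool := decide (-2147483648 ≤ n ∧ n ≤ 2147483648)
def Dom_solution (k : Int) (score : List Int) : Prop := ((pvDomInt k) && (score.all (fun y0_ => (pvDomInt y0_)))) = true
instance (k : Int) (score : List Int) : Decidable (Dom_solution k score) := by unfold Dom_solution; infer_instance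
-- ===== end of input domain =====

-- B replaces A's per-day "append/replace last, then full descending sort" by an ascending
-- list maintained with positional insertion and a pop of the minimum (alternative decomposition).

-- ===== PORT A =====
-- state = (answer, legend); legend.pop() removes the last element (dropLast);
-- legend[-1] is ported as pyGetD legend (-1) 0: the default 0 is reached only where
-- Python raises IndexError (empty legend, i.e. k ≤ 0 with nonempty score), excluded by Pre_.
def solution (k : Int) (score : List Int) : List Int :=
  (score.foldl (fun (st : List Int × List Int) today_s =>
      let answer := st.1
      let legend := st.2
      let legend :=
        if (legend.length : Int) < k then legend ++ [today_s]
        else if PySem.List.pyGetD legend (-1) 0 < today_s then legend.dropLast ++ [today_s]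
        else legend
      let legend := PySem.List.sorted legend (fun x => x) true
      (answer ++ [PySem.List.pyGetD legend (-1) 0], legend))
    ([], [])).1

-- ===== PORT B =====
-- Source B's 'while lo < hi' binary search for the insertion position; hall[mid] is
-- pyGetD (here 0 ≤ lo ≤ mid < hi ≤ len, so the default 0 is never reached);
-- (lo + hi) // 2 on the nonnegative lo, hi is Nat division.
-- fuel = hi - lo makes the recursion structural (a pure totality guard: the fuel
-- never runs out before 'lo < hi' fails, proved in bisect_spec below)
def bisectAux : Nat → List Int → Int → Nat → Nat → Nat
  | 0, _, _, lo, _ => lo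
  | fuel + 1, hall, s, lo, hi =>
    if lo < hi then
      let mid := (lo + hi) / 2
      if PySem.List.pyGetD hall (mid : Int) 0 ≤ s then bisectAux fuel hall s (mid + 1) hi
      else bisectAux fuel hall s lo mid
    else lo

def bisect (hall : List Int) (s : Int) (lo hi : Nat) : Nat :=
  bisectAux (hi - lo) hall s lo hi

-- state = (answer, hall); hall.insert(lo, s) is PySem.List.insert; hall.pop(0) on the
-- (nonempty) freshly-inserted list is .tail; hall[0] is pyGetD hall 0 0 (default
-- reached only where Python raises IndexError, excluded by Pre_).
def solution_alt (k : Int) (score : List Int) : List Int :=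
  (score.foldl (fun (st : List Int × List Int) s =>
      let lo := bisect st.2 s 0 st.2.length
      let hall := PySem.List.insert st.2 (lo : Int) s
      let hall := if k < (hall.length : Int) then hall.tail else hall
      (st.1 ++ [PySem.List.pyGetD hall 0 0], hall)) ([], [])).1

-- ===== PRECONDITION & SPEC =====
-- Both Pythons raise IndexError when k ≤ 0 and score is nonempty (A on legend[-1] of the
-- empty legend, B on hall[0] of the emptied hall); exactly those inputs are excluded.
def Pre_solution (k : Int) (score : List Int) : Prop := score = [] ∨ 1 ≤ k
instance (k : Int) (score : List Int) : Decidable (Pre_solution k score) := by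
  unfold Pre_solution; infer_instance

def pvWitness_solution : Int × List Int := (3, [10, 100, 20, 150, 1, 100, 200])

def Spec_solution (k : Int) (score : List Int) (out : List Int) : Prop := out = solution_alt k score
instance (k : Int) (score : List Int) (out : List Int) : Decidable (Spec_solution k score out) := by
  unfold Spec_solution; infer_instance

-- ===== CLAIM (what is proved, stated in full; the proofs are below) =====
def Claim_equal_solution : Prop := ∀ (k : Int) (score : List Int), Dom_solution k score → Pre_solution k score → Spec_solution k score (solution k score)

-- ===== LEMMAS AND PROOFS =====

-- proof-side model of one positional insertion into the ascending hall
def insertAsc : List Int → Int → List Int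
  | [], s => [s]
  | h :: t, s => if h ≤ s then h :: insertAsc t s else s :: h :: t


lemma insertAsc_ne_nil (l : List Int) (s : Int) : insertAsc l s ≠ [] := by
  cases l with
  | nil => simp [insertAsc]
  | cons h t => simp only [insertAsc]; split <;> simp

lemma insertAsc_perm (l : List Int) (s : Int) : (insertAsc l s).Perm (s :: l) := by
  induction l with
  | nil => simp [insertAsc]
  | cons h t ih =>
    simp only [insertAsc]
    split
    · exact ((ih.cons h).trans (List.Perm.swap s h t))
    · exact List.Perm.refl _

lemma insertAsc_length (l : List Int) (s : Int) : (insertAsc l s).length = l.length + 1 := by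
  simpa using (insertAsc_perm l s).length_eq

lemma insertAsc_pairwise (l : List Int) (s : Int) (hl : l.Pairwise (· ≤ ·)) :
    (insertAsc l s).Pairwise (· ≤ ·) := by
  induction l with
  | nil => simp [insertAsc]
  | cons h t ih =>
    rcases List.pairwise_cons.1 hl with ⟨hall, ht⟩
    simp only [insertAsc]
    split
    · rename_i hhs
      refine List.pairwise_cons.2 ⟨?_, ih ht⟩
      intro x hx
      rcases List.mem_cons.1 ((insertAsc_perm t s).mem_iff.1 hx) with hxe | hx2
      · rw [hxe]; exact hhs
      · exact hall x hx2
    · rename_i hhs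
      refine List.pairwise_cons.2 ⟨?_, hl⟩
      intro x hx
      rcases List.mem_cons.1 hx with hxe | hx2
      · rw [hxe]; omega
      · exact le_trans (by omega) (hall x hx2)

lemma insertAsc_of_le (l : List Int) (s : Int) (h : ∀ x ∈ l, s ≤ x) (hl : l.Pairwise (· ≤ ·)) :
    insertAsc l s = s :: l := by
  induction l with
  | nil => rfl
  | cons a t ih =>
    simp only [insertAsc]
    split
    · rename_i has
      have hsa : s ≤ a := h a (by simp)
      have hax : a = s := le_antisymm has hsa
      subst hax
      rw [ih (fun x hx => h x (by simp [hx])) (List.pairwise_cons.1 hl).2]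
    · rfl

-- two lists with the same elements, both sorted descendingly, are equal
lemma eq_of_perm_of_desc (l₁ l₂ : List Int) (hp : l₁.Perm l₂)
    (h₁ : l₁.Pairwise (fun a b => b ≤ a)) (h₂ : l₂.Pairwise (fun a b => b ≤ a)) : l₁ = l₂ := by
  refine PySem.List.eq_of_perm_of_pairwise_le_of_injective (fun x : Int => -x) ?_ hp ?_ ?_
  · exact fun a b h => neg_injective h
  · exact h₁.imp (fun h => neg_le_neg h)
  · exact h₂.imp (fun h => neg_le_neg h)

-- the central fact: A's daily re-sort of (old hall, reversed) ++ [s] is exactly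
-- the reverse of B's positional insertion into the ascending hall.
lemma sorted_rev_eq_insertAsc (hall : List Int) (s : Int) (hs : hall.Pairwise (· ≤ ·)) :
    PySem.List.sorted (hall.reverse ++ [s]) (fun x => x) true = (insertAsc hall s).reverse := by
  apply eq_of_perm_of_desc
  · refine (PySem.List.sorted_perm _ _ _).trans ?_
    have h1 : (hall.reverse ++ [s]).Perm (s :: hall) :=
      (List.perm_append_comm).trans (List.Perm.cons s hall.reverse_perm)
    exact h1.trans (((insertAsc_perm hall s).symm).trans (insertAsc hall s).reverse_perm.symm)
  · exact PySem.List.sorted_pairwise_rev (xs := hall.reverse ++ [s]) (key := fun x : Int => x)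
  · exact (List.pairwise_reverse).2 (insertAsc_pairwise hall s hs)

lemma head_eq_last_reverse (l : List Int) (hne : l ≠ []) :
    PySem.List.pyGetD l.reverse (-1) 0 = PySem.List.pyGetD l 0 0 := by
  cases l with
  | nil => simp at hne
  | cons h t =>
    rw [PySem.List.pyGetD_neg_one ((h :: t).reverse) 0 (by simp)]
    simp [PySem.List.pyGetD_zero_cons]

-- bisect returns a split point: everything strictly below it is ≤ s, everything from it on is > s
lemma bisect_spec (l : List Int) (s : Int) (hl : l.Pairwise (· ≤ ·)) :
    ∀ (n lo hi : Nat), hi - lo ≤ n → lo ≤ hi → hi ≤ l.length →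
    (∀ i (h : i < l.length), i < lo → l[i] ≤ s) →
    (∀ i (h : i < l.length), hi ≤ i → s < l[i]) →
    lo ≤ bisectAux n l s lo hi ∧ bisectAux n l s lo hi ≤ hi ∧
    (∀ i (h : i < l.length), i < bisectAux n l s lo hi → l[i] ≤ s) ∧
    (∀ i (h : i < l.length), bisectAux n l s lo hi ≤ i → s < l[i]) := by
  have hmono := List.pairwise_iff_getElem.1 hl
  intro n
  induction n with
  | zero =>
    intro lo hi hfuel hlohi hhil h1 h2
    simp only [bisectAux]
    exact ⟨le_rfl, by omega, h1, fun i h hi => h2 i h (by omega)⟩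
  | succ n ihn =>
    intro lo hi hfuel hlohi hhil h1 h2
    by_cases hlt : lo < hi
    · have hmid1 : lo ≤ (lo + hi) / 2 := by omega
      have hmid2 : (lo + hi) / 2 < hi := by omega
      have hmlen : (lo + hi) / 2 < l.length := by omega
      simp only [bisectAux, if_pos hlt, PySem.List.pyGetD_natCast,
        List.getD_eq_getElem l 0 hmlen]
      by_cases hms : l[(lo + hi) / 2] ≤ s
      · rw [if_pos hms]
        have h1' : ∀ i (h : i < l.length), i < (lo + hi) / 2 + 1 → l[i] ≤ s := by
          intro i h hilt
          by_cases hie : i = (lo + hi) / 2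
          · subst hie; exact hms
          · exact le_trans (hmono i ((lo + hi) / 2) h hmlen (by omega)) hms
        have := ihn ((lo + hi) / 2 + 1) hi (by omega) (by omega) hhil h1' h2
        exact ⟨by omega, this.2.1, this.2.2⟩
      · rw [if_neg hms]
        have hsm : s < l[(lo + hi) / 2] := by omega
        have h2' : ∀ i (h : i < l.length), (lo + hi) / 2 ≤ i → s < l[i] := by
          intro i h hile
          by_cases hie : (lo + hi) / 2 = i
          · subst hie; exact hsm
          · exact lt_of_lt_of_le hsm (hmono ((lo + hi) / 2) i hmlen h (by omega))
        have := ihn lo ((lo + hi) / 2) (by omega) (by omega) (by omega) h1 h2'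
        exact ⟨this.1, by omega, this.2.2⟩
    · simp only [bisectAux, if_neg hlt]
      exact ⟨le_rfl, by omega, h1, fun i h hi => h2 i h (by omega)⟩

-- inserting at that split point is exactly the positional insertion
lemma insert_at_eq_insertAsc (l : List Int) (s : Int) :
    ∀ (r : Nat), r ≤ l.length →
    (∀ i (h : i < l.length), i < r → l[i] ≤ s) →
    (∀ i (h : i < l.length), r ≤ i → s < l[i]) →
    l.take r ++ s :: l.drop r = insertAsc l s := by
  induction l with
  | nil =>
    intro r hr _ _
    have : r = 0 := by simpa using hr
    subst this; rfl
  | cons h t ih =>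
    intro r hr h1 h2
    cases r with
    | zero =>
      have hsh : s < h := h2 0 (by simp) (by omega)
      simp only [List.take_zero, List.drop_zero, List.nil_append, insertAsc]
      rw [if_neg (by omega)]
    | succ j =>
      have hhs : h ≤ s := h1 0 (by simp) (by omega)
      simp only [List.take_succ_cons, List.drop_succ_cons, List.cons_append, insertAsc]
      rw [if_pos hhs,
        ih j (by simpa using hr)
          (fun i hi hij => h1 (i + 1) (by simpa using hi) (by omega))
          (fun i hi hij => h2 (i + 1) (by simpa using hi) (by omega))]

-- B's binary-search insertion on the sorted hall IS the positional insertion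
lemma insert_bisect (hall : List Int) (s : Int) (hs : hall.Pairwise (· ≤ ·)) :
    PySem.List.insert hall ((bisect hall s 0 hall.length : Nat) : Int) s = insertAsc hall s := by
  obtain ⟨hlo, hhi, hbelow, habove⟩ :=
    bisect_spec hall s hs (hall.length - 0) 0 hall.length (by omega) (by omega) le_rfl
      (fun i h hi => by omega) (fun i h hi => by omega)
  unfold bisect
  rw [PySem.List.insert_natCast hall (bisectAux (hall.length - 0) hall s 0 hall.length) s hhi]
  exact insert_at_eq_insertAsc hall s _ hhi hbelow habove

-- loop invariant: A's legend is the reverse of B's ascending hall, answers agree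
lemma loop_eq (k : Int) (hk : 1 ≤ k) (score : List Int) :
    ∀ (ans hall : List Int), hall.Pairwise (· ≤ ·) →
    (score.foldl (fun (st : List Int × List Int) today_s =>
      let answer := st.1
      let legend := st.2
      let legend :=
        if (legend.length : Int) < k then legend ++ [today_s]
        else if PySem.List.pyGetD legend (-1) 0 < today_s then legend.dropLast ++ [today_s]
        else legend
      let legend := PySem.List.sorted legend (fun x => x) true
      (answer ++ [PySem.List.pyGetD legend (-1) 0], legend)) (ans, hall.reverse)).1 =
    (score.foldl (fun (st : List Int × List Int) s =>
      let lo := bisect st.2 s 0 st.2.length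
      let h2 := PySem.List.insert st.2 (lo : Int) s
      let h2 := if k < (h2.length : Int) then h2.tail else h2
      (st.1 ++ [PySem.List.pyGetD h2 0 0], h2)) (ans, hall)).1 := by
  induction score with
  | nil => intro ans hall _; rfl
  | cons s rest ih =>
    intro ans hall hsorted
    simp only [List.foldl_cons]
    rw [insert_bisect hall s hsorted]
    by_cases hlen : ((hall.reverse.length : Int) < k)
    · -- growing phase: both sides insert s, B does not trim
      have hlenN : (hall.length : Int) < k := by simpa using hlen
      have hlen' : ¬ k < ((insertAsc hall s).length : Int) := by
        rw [insertAsc_length]; push_cast; omega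
      rw [if_pos hlen, sorted_rev_eq_insertAsc hall s hsorted, if_neg hlen',
        head_eq_last_reverse _ (insertAsc_ne_nil hall s)]
      exact ih _ (insertAsc hall s) (insertAsc_pairwise hall s hsorted)
    · -- full phase: hall has ≥ k ≥ 1 elements, so it is nonempty
      cases hall with
      | nil =>
        exfalso
        simp only [List.reverse_nil, List.length_nil, Nat.cast_zero, not_lt] at hlen
        omega
      | cons h t =>
        have hlenN : ¬ ((t.length : Int) + 1 < k) := by simpa using hlen
        have hlast : PySem.List.pyGetD (h :: t).reverse (-1) 0 = h := by
          rw [PySem.List.pyGetD_neg_one ((h :: t).reverse) 0 (by simp)]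
          simp
        have htrim : k < ((insertAsc (h :: t) s).length : Int) := by
          rw [insertAsc_length]; simp only [List.length_cons]; push_cast; omega
        rcases List.pairwise_cons.1 hsorted with ⟨hmin, htsorted⟩
        by_cases hrepl : h < s
        · -- A replaces the minimum; B inserts then pops the head (= old minimum h)
          have hB : (insertAsc (h :: t) s).tail = insertAsc t s := by
            simp only [insertAsc]; rw [if_pos (by omega : h ≤ s), List.tail_cons]
          have hdrop : ((h :: t).reverse).dropLast = t.reverse := by
            simp [List.reverse_cons]
          rw [if_neg hlen, hlast, if_pos hrepl, hdrop,
            sorted_rev_eq_insertAsc t s htsorted, if_pos htrim, hB,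
            head_eq_last_reverse _ (insertAsc_ne_nil t s)]
          exact ih _ (insertAsc t s) (insertAsc_pairwise t s htsorted)
        · -- A keeps the legend; B inserts s then pops it right back out
          have htail : (insertAsc (h :: t) s).tail = h :: t := by
            simp only [insertAsc]
            by_cases hhs : h ≤ s
            · have hse : h = s := le_antisymm hhs (by omega)
              subst hse
              rw [if_pos le_rfl, List.tail_cons,
                insertAsc_of_le t h (fun x hx => hmin x hx) htsorted]
            · rw [if_neg hhs, List.tail_cons]
          have hstate : PySem.List.sorted ((h :: t).reverse) (fun x => x) true
              = (h :: t).reverse := by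
            apply PySem.List.sorted_rev_eq_self_of_pairwise
            exact (List.pairwise_reverse).2 hsorted
          rw [if_neg hlen, hlast, if_neg hrepl, hstate, if_pos htrim, htail,
            head_eq_last_reverse (h :: t) (by simp)]
          exact ih _ (h :: t) hsorted

-- ===== VERDICT (by name: the statement is the Claim_ definition above) =====
theorem solution_spec : Claim_equal_solution := by
  intro k score _ hpre
  unfold Spec_solution solution solution_alt
  rcases hpre with rfl | hk
  · rfl
  · have := loop_eq k hk score [] [] (by simp)
    simpa using this
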